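-- pv_equiv track=rewrite | github.com/apache/trafficserver | tests/tools/traffic-replay/extractHeader.py | responseHeader_to_dict
-- ===== SOURCE A (Python) =====
-- def responseHeader_to_dict(header):
--     headerFields = header.split('\r\n', 1)[1]
--     fields = headerFields.split('\r\n')
--     header = [x for x in fields if (x != u'')]
--     headers = {}
--     for line in header:
--         split_here = line.find(":")
--         # append multiple headers into a single string
--         if line[:split_here].lower() in headers:
--             headers[line[:split_here].lower()] += ", {0}".format(line[(split_here + 1):].strip())
--         else:
--             headers[line[:split_here].lower()] = line[(split_here + 1):].strip()
--
--     return headers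
-- ===== SOURCE B (Python) =====
-- def responseHeader_to_dict(header):
--     headerFields = header.split('\r\n', 1)[1]
--     fields = headerFields.split('\r\n')
--     lines = [x for x in fields if x != '']
--     parsed = []
--     for line in lines:
--         split_here = line.find(":")
--         parsed.append((line[:split_here].lower(), line[(split_here + 1):].strip()))
--     keys = dict.fromkeys(k for k, _ in parsed)
--     return {k: ", ".join(v for kk, v in parsed if kk == k) for k in keys}
-- ===== Notes on version B (the rewrite author's own statement) =====
-- stated objective: alternative
-- what changed: Replaces A's incremental dict with string concatenation per duplicate key by a two-pass group-then-join: parse every line into (key, value) pairs once, dedup the keys in order, then build each entry by joining all values of that key with a comma-space separator.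
import Mathlib
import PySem

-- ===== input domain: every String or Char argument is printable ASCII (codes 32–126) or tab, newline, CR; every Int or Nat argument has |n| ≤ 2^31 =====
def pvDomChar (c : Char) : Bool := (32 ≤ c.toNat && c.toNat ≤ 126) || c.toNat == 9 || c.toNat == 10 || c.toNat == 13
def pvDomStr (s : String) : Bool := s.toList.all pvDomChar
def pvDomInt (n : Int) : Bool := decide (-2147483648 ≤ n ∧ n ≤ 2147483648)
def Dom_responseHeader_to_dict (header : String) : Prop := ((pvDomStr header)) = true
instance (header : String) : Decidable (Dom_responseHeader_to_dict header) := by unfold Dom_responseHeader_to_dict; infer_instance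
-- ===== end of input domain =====

-- B replaces A's incremental dict (string concatenation on duplicate keys) by a two-pass
-- group-then-join decomposition (parse all lines to pairs, dedup keys in order, join each key's values).

-- ===== PORT A =====
def responseHeader_to_dict (header : String) : List (String × String) :=
  let headerFields : String :=
    ((PySem.Str.splitMax? header "\r\n" 1).getD []).getD 1 ""   -- [1]: IndexError excluded by Pre_
  let fields := (PySem.Str.split? headerFields "\r\n").getD []  -- none unreachable: sep ≠ ""
  let header' := fields.filter (fun x => x ≠ "")
  let headers : PySem.Dict String String :=
    header'.foldl (fun headers line =>
      let split_here := PySem.Str.find line ":"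
      match headers.get? (PySem.Str.lower (PySem.Str.slice line none (some split_here))) with
      | some old =>
          headers.insert (PySem.Str.lower (PySem.Str.slice line none (some split_here)))
            (old ++ ", " ++ PySem.Str.strip (PySem.Str.slice line (some (split_here + 1)) none))
      | none =>
          headers.insert (PySem.Str.lower (PySem.Str.slice line none (some split_here)))
            (PySem.Str.strip (PySem.Str.slice line (some (split_here + 1)) none)))
      PySem.Dict.empty
  headers.items

-- ===== PORT B =====
def responseHeader_to_dict_alt (header : String) : List (String × String) :=
  let headerFields : String :=
    ((PySem.Str.splitMax? header "\r\n" 1).getD []).getD 1 ""   -- [1]: IndexError excluded by Pre_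
  let fields := (PySem.Str.split? headerFields "\r\n").getD []  -- none unreachable: sep ≠ ""
  let lines := fields.filter (fun x => x ≠ "")
  let parsed : List (String × String) := lines.map (fun line =>
    let split_here := PySem.Str.find line ":"
    (PySem.Str.lower (PySem.Str.slice line none (some split_here)),
     PySem.Str.strip (PySem.Str.slice line (some (split_here + 1)) none)))
  let keys := PySem.List.dedup (parsed.map (·.1))
  keys.map (fun k => (k, PySem.Str.join ", " ((parsed.filter (fun p => p.1 == k)).map (·.2))))

-- ===== PRECONDITION & SPEC =====
-- Pre_ excludes exactly the headers containing no CRLF separator at all: there A's first split yields a single piece and indexing piece [1] raises IndexError.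
def Pre_responseHeader_to_dict (header : String) : Prop :=
  PySem.Str.isIn "\r\n" header = true
instance (header : String) : Decidable (Pre_responseHeader_to_dict header) := by
  unfold Pre_responseHeader_to_dict; infer_instance

def pvWitness_responseHeader_to_dict : String := "HTTP/1.1 200 OK\r\nHost: a\r\nHost: b\r\n\r\n"

def Spec_responseHeader_to_dict (header : String) (out : List (String × String)) : Prop := out = responseHeader_to_dict_alt header
instance (header : String) (out : List (String × String)) : Decidable (Spec_responseHeader_to_dict header out) := by unfold Spec_responseHeader_to_dict; infer_instance

-- ===== CLAIM (what is proved, stated in full; the proofs are below) =====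
def Claim_equal_responseHeader_to_dict : Prop := ∀ (header : String), Dom_responseHeader_to_dict header → Pre_responseHeader_to_dict header → Spec_responseHeader_to_dict header (responseHeader_to_dict header)

-- ===== LEMMAS AND PROOFS =====

-- key and value extracted from a header line (A computes these inline; B's parse pass produces them)
def pvKeyOf (line : String) : String :=
  PySem.Str.lower (PySem.Str.slice line none (some (PySem.Str.find line ":")))
def pvValOf (line : String) : String :=
  PySem.Str.strip (PySem.Str.slice line (some (PySem.Str.find line ":" + 1)) none)

-- A's loop body, named for the proofs (definitionally the lambda in port A)
def pvStepA (headers : PySem.Dict String String) (line : String) : PySem.Dict String String :=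
  match headers.get? (pvKeyOf line) with
  | some old => headers.insert (pvKeyOf line) (old ++ ", " ++ pvValOf line)
  | none => headers.insert (pvKeyOf line) (pvValOf line)

lemma pvStepA_eq_insert (d : PySem.Dict String String) (line : String) :
    pvStepA d line = d.insert (pvKeyOf line)
      (match d.get? (pvKeyOf line) with
       | some old => old ++ ", " ++ pvValOf line
       | none => pvValOf line) := by
  unfold pvStepA; cases d.get? (pvKeyOf line) <;> rfl

lemma chars_join_append_singleton (sep v : List Char) (vs : List (List Char)) (h : vs ≠ []) :
    PySem.Chars.join sep (vs ++ [v]) = PySem.Chars.join sep vs ++ sep ++ v := by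
  induction vs with
  | nil => simp at h
  | cons a t ih =>
    cases t with
    | nil =>
      simp only [List.cons_append, List.nil_append]
      rw [PySem.Chars.join_cons_cons, PySem.Chars.join_singleton, PySem.Chars.join_singleton]
    | cons b t' =>
      simp only [List.cons_append] at *
      rw [PySem.Chars.join_cons_cons, ih (by simp), PySem.Chars.join_cons_cons]
      simp [List.append_assoc]

lemma str_join_singleton (sep v : String) : PySem.Str.join sep [v] = v := by
  apply String.toList_inj.mp
  simp [PySem.Chars.join_singleton]

lemma str_join_append_singleton (sep : String) (vs : List String) (v : String) (h : vs ≠ []) :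
    PySem.Str.join sep (vs ++ [v]) = PySem.Str.join sep vs ++ sep ++ v := by
  apply String.toList_inj.mp
  simp only [PySem.Str.toList_join, List.map_append, List.map_cons, List.map_nil,
    String.toList_append]
  rw [chars_join_append_singleton _ _ _ (by simpa using h)]

-- keys of A's accumulation dict
lemma pvFoldA_keys (l : List String) :
    (l.foldl pvStepA PySem.Dict.empty).keys = PySem.Set.ofList (l.map pvKeyOf) := by
  have h : l.foldl pvStepA PySem.Dict.empty
      = l.foldl (fun d line => d.insert (pvKeyOf line)
          (match d.get? (pvKeyOf line) with
           | some old => old ++ ", " ++ pvValOf line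
           | none => pvValOf line)) PySem.Dict.empty := by
    have he : pvStepA = fun d line => d.insert (pvKeyOf line)
        (match d.get? (pvKeyOf line) with
         | some old => old ++ ", " ++ pvValOf line
         | none => pvValOf line) := by
      funext d line; exact pvStepA_eq_insert d line
    rw [he]
  rw [h, PySem.Dict.keys_foldl_insert_key]
  simp [PySem.Dict.keys, PySem.Dict.empty, PySem.Set.update_nil_left]

-- characterization of A's accumulation loop
set_option maxHeartbeats 1000000 in
lemma pvFoldA_items (l : List String) :
    (l.foldl pvStepA PySem.Dict.empty).items
    = (PySem.Set.ofList (l.map pvKeyOf)).map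
        (fun k => (k, PySem.Str.join ", " ((l.filter (fun line => pvKeyOf line == k)).map pvValOf))) := by
  induction l using List.reverseRecOn with
  | nil => rfl
  | append_singleton l x ih =>
    rw [List.foldl_append, List.foldl_cons, List.foldl_nil]
    have hkeys := pvFoldA_keys l
    have hnd : (l.foldl pvStepA PySem.Dict.empty).keys.Nodup := by
      rw [hkeys]; exact PySem.Set.nodup_ofList _
    by_cases hmem : pvKeyOf x ∈ l.map pvKeyOf
    · have hk0 : pvKeyOf x ∈ PySem.Set.ofList (l.map pvKeyOf) := (PySem.Set.mem_ofList _ _).mpr hmem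
      have hitem : (pvKeyOf x,
          PySem.Str.join ", " ((l.filter (fun line => pvKeyOf line == pvKeyOf x)).map pvValOf))
          ∈ (l.foldl pvStepA PySem.Dict.empty).items := by
        rw [ih]
        exact List.mem_map_of_mem hk0
      have hget : (l.foldl pvStepA PySem.Dict.empty).get? (pvKeyOf x)
          = some (PySem.Str.join ", " ((l.filter (fun line => pvKeyOf line == pvKeyOf x)).map pvValOf)) :=
        PySem.Dict.get?_of_mem_items _ hitem hnd
      have hcont : (l.foldl pvStepA PySem.Dict.empty).contains (pvKeyOf x) = true := by
        rw [PySem.Dict.contains_eq_isSome_get?, hget]; rfl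
      have hstep : pvStepA (l.foldl pvStepA PySem.Dict.empty) x
          = (l.foldl pvStepA PySem.Dict.empty).insert (pvKeyOf x)
            (PySem.Str.join ", " ((l.filter (fun line => pvKeyOf line == pvKeyOf x)).map pvValOf)
              ++ ", " ++ pvValOf x) := by
        rw [pvStepA_eq_insert, hget]
      rw [hstep, PySem.Dict.items_insert_of_contains _ _ hcont, ih, List.map_map,
        List.map_append, List.map_cons, List.map_nil, PySem.Set.ofList_append_singleton, PySem.Set.add_of_mem hk0]
      apply List.map_congr_left
      intro k hk
      obtain ⟨line0, hline0, hkey0⟩ := List.mem_map.mp hmem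
      by_cases hkk : k = pvKeyOf x
      · subst hkk
        have hne : (l.filter (fun line => pvKeyOf line == pvKeyOf x)).map pvValOf ≠ [] := by
          have hmemf : line0 ∈ l.filter (fun line => pvKeyOf line == pvKeyOf x) :=
            List.mem_filter.mpr ⟨hline0, by simp [hkey0]⟩
          exact fun hnil => by simp [List.map_eq_nil_iff.mp hnil] at hmemf
        simp only [Function.comp_apply, beq_self_eq_true, if_pos, List.filter_append,
          List.map_append]
        rw [show List.map pvValOf (List.filter (fun line => pvKeyOf line == pvKeyOf x) [x])
              = [pvValOf x] from by simp,
          str_join_append_singleton _ _ _ hne]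
      · have hne' : (k == pvKeyOf x) = false := beq_false_of_ne hkk
        simp only [Function.comp_apply, hne', List.filter_append]
        have : (List.filter (fun line => pvKeyOf line == k) [x]) = [] := by
          simp [beq_false_of_ne (fun h => hkk h.symm)]
        simp [this]
    · have hk0 : pvKeyOf x ∉ PySem.Set.ofList (l.map pvKeyOf) := fun h => hmem ((PySem.Set.mem_ofList _ _).mp h)
      have hget : (l.foldl pvStepA PySem.Dict.empty).get? (pvKeyOf x) = none := by
        rw [PySem.Dict.get?_eq_none_iff_not_mem_keys, hkeys]; exact hk0
      have hcont : (l.foldl pvStepA PySem.Dict.empty).contains (pvKeyOf x) = false := by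
        rw [PySem.Dict.contains_eq_isSome_get?, hget]; rfl
      have hstep : pvStepA (l.foldl pvStepA PySem.Dict.empty) x
          = (l.foldl pvStepA PySem.Dict.empty).insert (pvKeyOf x) (pvValOf x) := by
        rw [pvStepA_eq_insert, hget]
      rw [hstep, PySem.Dict.items_insert_of_not_contains _ _ hcont, ih]
      rw [List.map_append, List.map_cons, List.map_nil]
      rw [PySem.Set.ofList_append_singleton]
      rw [PySem.Set.add_of_not_mem hk0]
      rw [List.map_append]
      simp only [List.map_cons, List.map_nil]
      have hfl : l.filter (fun line => pvKeyOf line == pvKeyOf x) = [] := by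
        apply List.filter_eq_nil_iff.mpr
        intro line hline h
        exact hmem (List.mem_map.mpr ⟨line, hline, eq_of_beq h⟩)
      have hright : PySem.Str.join ", "
          (((l ++ [x]).filter (fun line => pvKeyOf line == pvKeyOf x)).map pvValOf) = pvValOf x := by
        rw [List.filter_append, hfl]
        simp [str_join_singleton]
      rw [hright]
      have hmap : (PySem.Set.ofList (l.map pvKeyOf)).map
            (fun k => (k, PySem.Str.join ", " (((l ++ [x]).filter (fun line => pvKeyOf line == k)).map pvValOf)))
          = (PySem.Set.ofList (l.map pvKeyOf)).map
            (fun k => (k, PySem.Str.join ", " ((l.filter (fun line => pvKeyOf line == k)).map pvValOf))) := by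
        apply List.map_congr_left
        intro k hk
        have hkk : pvKeyOf x ≠ k := fun h => hk0 (h ▸ hk)
        have hx : List.filter (fun line => pvKeyOf line == k) [x] = [] := by
          simp [beq_false_of_ne hkk]
        rw [List.filter_append, hx, List.append_nil]
      rw [hmap]

-- bridging: A's fold characterization rewritten into B's dedup/filter form
lemma pvMain_eq (lines : List String) :
    (lines.foldl pvStepA PySem.Dict.empty).items =
    (PySem.List.dedup ((lines.map (fun line => (pvKeyOf line, pvValOf line))).map (·.1))).map
      (fun k => (k, PySem.Str.join ", "
        (((lines.map (fun line => (pvKeyOf line, pvValOf line))).filter (fun p => p.1 == k)).map (·.2)))) := by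
  have hdedup : PySem.List.dedup (α := String) = PySem.Set.ofList := rfl
  rw [pvFoldA_items, hdedup, List.map_map]
  have h1 : ((fun p : String × String => p.1) ∘ fun line => (pvKeyOf line, pvValOf line)) = pvKeyOf := rfl
  rw [h1]
  apply List.map_congr_left
  intro k hk
  congr 1
  rw [List.filter_map, List.map_map]
  rfl

-- ===== VERDICT (by name: the statement is the Claim_ definition above) =====
theorem responseHeader_to_dict_spec : Claim_equal_responseHeader_to_dict := by
  intro header _ _
  show responseHeader_to_dict header = responseHeader_to_dict_alt header
  exact pvMain_eq _
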